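-- pv_equiv track=rewrite | github.com/FedeBaldi-28/askqe-weighted-extension | QA/code/mapping_biomqm.py | get_max_severity
-- ===== SOURCE A (Python) =====
-- SEVERITY_ORDER = {"Critical": 4, "Major": 3, "Minor": 2, "Neutral": 1}
--
-- def get_max_severity(errors_tgt):
--     """
--     Extract max severity from error list.
--     Priority: Critical > Major > Minor > Neutral
--     """
--     if not errors_tgt:
--         return "Neutral"
--
--     max_severity = "Neutral"
--     max_order = 0
--
--     for error in errors_tgt:
--         sev = error.get("severity", "Neutral")
--         if SEVERITY_ORDER.get(sev, 0) > max_order: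
--             max_order = SEVERITY_ORDER[sev]
--             max_severity = sev
--
--     return max_severity
-- ===== SOURCE B (Python) =====
-- SEVERITY_ORDER = {"Critical": 4, "Major": 3, "Minor": 2, "Neutral": 1}
--
-- def get_max_severity(errors_tgt):
--     """
--     Extract max severity from error list.
--     Priority: Critical > Major > Minor > Neutral
--     """
--     present = {error.get("severity", "Neutral") for error in errors_tgt}
--     for sev in ("Critical", "Major", "Minor"):
--         if sev in present:
--             return sev
--     return "Neutral"
-- ===== Notes on version B (the rewrite author's own statement) =====
-- stated objective: simpler
-- what changed: Instead of scanning the errors while tracking a running maximum (severity, order) pair against a numeric order table, B collects the set of severities present and scans the fixed priority ranking Critical>Major>Minor, returning the first level present (Neutral as fallback).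
import Mathlib
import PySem

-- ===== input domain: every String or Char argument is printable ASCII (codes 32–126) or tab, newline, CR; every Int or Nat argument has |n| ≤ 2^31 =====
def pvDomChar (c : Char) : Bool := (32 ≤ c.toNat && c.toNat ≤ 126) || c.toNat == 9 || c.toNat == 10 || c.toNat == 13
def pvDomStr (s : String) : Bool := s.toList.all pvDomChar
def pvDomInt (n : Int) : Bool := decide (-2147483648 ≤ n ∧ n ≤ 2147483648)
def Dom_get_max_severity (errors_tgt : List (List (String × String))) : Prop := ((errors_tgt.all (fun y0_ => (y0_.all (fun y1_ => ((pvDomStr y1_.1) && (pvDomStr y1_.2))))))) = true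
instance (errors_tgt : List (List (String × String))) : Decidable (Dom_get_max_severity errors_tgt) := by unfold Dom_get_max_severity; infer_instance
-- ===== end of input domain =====

-- B replaces A's running-max scan over the errors by a present-severity set plus a scan of the
-- fixed priority ranking (simpler decomposition; same cost).

-- ===== PORT A =====
def SEVERITY_ORDER : PySem.Dict String Int :=
  PySem.Dict.ofList [("Critical", 4), ("Major", 3), ("Minor", 2), ("Neutral", 1)]

-- error.get("severity", "Neutral") — shared by both ports (both Pythons compute exactly this)
def sevOf (error : List (String × String)) : String :=
  (PySem.Dict.mk error).getD "severity" "Neutral"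

-- the for-loop of A, state = (max_severity, max_order); SEVERITY_ORDER[sev] in the taken branch
-- equals SEVERITY_ORDER.get(sev, 0) there (the guard guarantees the key is present), ported as getD.
def loopA : List (List (String × String)) → String × Int → String × Int
  | [], st => st
  | e :: rest, (ms, mo) =>
    let sev := sevOf e
    if SEVERITY_ORDER.getD sev 0 > mo then loopA rest (sev, SEVERITY_ORDER.getD sev 0)
    else loopA rest (ms, mo)

def get_max_severity (errors_tgt : List (List (String × String))) : String :=
  if errors_tgt = [] then "Neutral"
  else (loopA errors_tgt ("Neutral", 0)).1

-- ===== PORT B =====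
def get_max_severity_alt (errors_tgt : List (List (String × String))) : String :=
  let present : PySem.Set String := PySem.Set.ofList (errors_tgt.map sevOf)
  if present.contains "Critical" then "Critical"
  else if present.contains "Major" then "Major"
  else if present.contains "Minor" then "Minor"
  else "Neutral"

-- ===== PRECONDITION & SPEC =====
def Spec_get_max_severity (errors_tgt : List (List (String × String))) (out : String) : Prop := out = get_max_severity_alt errors_tgt
instance (errors_tgt : List (List (String × String))) (out : String) : Decidable (Spec_get_max_severity errors_tgt out) := by unfold Spec_get_max_severity; infer_instance

-- ===== CLAIM (what is proved, stated in full; the proofs are below) =====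
def Claim_equal_get_max_severity : Prop := ∀ (errors_tgt : List (List (String × String))), Dom_get_max_severity errors_tgt → Spec_get_max_severity errors_tgt (get_max_severity errors_tgt)

-- ===== LEMMAS AND PROOFS =====

-- SEVERITY_ORDER.get(sev, 0) as an if-chain on the key
lemma ord_spec (sev : String) :
    SEVERITY_ORDER.getD sev 0 =
      if sev = "Critical" then 4 else if sev = "Major" then 3
      else if sev = "Minor" then 2 else if sev = "Neutral" then 1 else 0 := by
  have hmk : SEVERITY_ORDER = PySem.Dict.mk [("Critical", 4), ("Major", 3), ("Minor", 2), ("Neutral", 1)] := by decide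
  rw [hmk, PySem.Dict.getD_eq_get?_getD]
  simp only [PySem.Dict.get?_mk_cons]
  by_cases h1 : sev = "Critical" <;> by_cases h2 : sev = "Major" <;> by_cases h3 : sev = "Minor" <;> by_cases h4 : sev = "Neutral" <;>
    subst_vars <;>
    first
      | decide
      | simp [PySem.Dict.get?, Ne.symm h1, Ne.symm h2, Ne.symm h3, Ne.symm h4, h1, h2, h3, h4]

-- the loop invariant: only five states are reachable, and the result is determined by which
-- severities occur in the remaining errors together with the current order
lemma loopA_spec (errs : List (List (String × String))) (ms : String) (mo : Int)
    (h : (ms, mo) = ("Neutral", 0) ∨ (ms, mo) = ("Neutral", 1) ∨ (ms, mo) = ("Minor", 2) ∨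
         (ms, mo) = ("Major", 3) ∨ (ms, mo) = ("Critical", 4)) :
    (loopA errs (ms, mo)).1 =
      if errs.any (fun e => sevOf e == "Critical") || mo == 4 then "Critical"
      else if errs.any (fun e => sevOf e == "Major") || mo == 3 then "Major"
      else if errs.any (fun e => sevOf e == "Minor") || mo == 2 then "Minor"
      else ms := by
  induction errs generalizing ms mo with
  | nil =>
    rcases h with h | h | h | h | h <;> injection h with h1 h2 <;> subst h1 <;> subst h2 <;> decide
  | cons e rest ih =>
    simp only [loopA, ord_spec]
    by_cases hc : sevOf e = "Critical"
    · rcases h with h | h | h | h | h <;> injection h with h1 h2 <;> subst h1 <;> subst h2 <;>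
        simp [hc, ih "Critical" 4 (by simp), List.any_cons]
    · by_cases hm : sevOf e = "Major"
      · rcases h with h | h | h | h | h <;> injection h with h1 h2 <;> subst h1 <;> subst h2 <;>
          simp [hc, hm, ih "Major" 3 (by simp), ih "Critical" 4 (by simp), List.any_cons]
      · by_cases hmi : sevOf e = "Minor"
        · rcases h with h | h | h | h | h <;> injection h with h1 h2 <;> subst h1 <;> subst h2 <;>
            simp [hc, hm, hmi, ih "Minor" 2 (by simp), ih "Major" 3 (by simp), ih "Critical" 4 (by simp), List.any_cons]
        · by_cases hn : sevOf e = "Neutral"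
          · rcases h with h | h | h | h | h <;> injection h with h1 h2 <;> subst h1 <;> subst h2 <;>
              simp [hc, hm, hmi, hn, ih "Neutral" 1 (by simp), ih "Minor" 2 (by simp), ih "Major" 3 (by simp), ih "Critical" 4 (by simp), List.any_cons]
          · rcases h with h | h | h | h | h <;> injection h with h1 h2 <;> subst h1 <;> subst h2 <;>
              simp [hc, hm, hmi, hn, ih "Neutral" 0 (by simp), ih "Neutral" 1 (by simp), ih "Minor" 2 (by simp), ih "Major" 3 (by simp), ih "Critical" 4 (by simp), List.any_cons]

lemma contains_present (errs : List (List (String × String))) (x : String) :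
    (PySem.Set.ofList (errs.map sevOf)).contains x = errs.any (fun e => sevOf e == x) := by
  rw [Bool.eq_iff_iff, List.any_eq_true]
  constructor
  · intro hx
    have hx' : ∃ a ∈ errs, sevOf a = x := by
      simpa [PySem.Set.contains, PySem.Set.mem_ofList] using hx
    rcases hx' with ⟨e, he, hv⟩
    exact ⟨e, he, by simp [hv]⟩
  · rintro ⟨e, he, hv⟩
    simp only [beq_iff_eq] at hv
    simp only [PySem.Set.contains, List.contains_iff_mem, PySem.Set.mem_ofList, List.mem_map]
    exact ⟨e, he, hv⟩

-- ===== VERDICT (by name: the statement is the Claim_ definition above) =====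
theorem get_max_severity_spec : Claim_equal_get_max_severity := by
  intro errs _
  unfold Spec_get_max_severity get_max_severity get_max_severity_alt
  rcases errs with _ | ⟨e, rest⟩
  · decide
  · rw [if_neg (by simp)]
    rw [loopA_spec _ _ _ (Or.inl rfl)]
    simp only [contains_present]
    norm_num
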